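-- pv_equiv track=rewrite | github.com/open-compass/BotChat | botchat/chat_api/hf_chat.py | get_gpu_num
-- ===== SOURCE A (Python) =====
-- def get_gpu_num(model_name):
--     model_name = model_name.lower()
--     kws = {
--         8: ['65b', '70b'],
--         4: ['30b', '33b', '35b', '40b'],
--         2: ['13b', '14b', '20b'],
--         1: ['6b', '7b'],
--     }
--     for k in [8, 4, 2, 1]:
--         for keyword in kws[k]:
--             if keyword in model_name:
--                 return k
--     return 8
-- ===== SOURCE B (Python) =====
-- def get_gpu_num(model_name):
--     m = model_name.lower()
--     counts = {
--         '65b': 8, '70b': 8,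
--         '30b': 4, '33b': 4, '35b': 4, '40b': 4,
--         '13b': 2, '14b': 2, '20b': 2,
--         '6b': 1, '7b': 1,
--     }
--     matched = [c for kw, c in counts.items() if kw in m]
--     return max(matched) if matched else 8
-- ===== Notes on version B (the rewrite author's own statement) =====
-- stated objective: simpler
-- what changed: Replaces the priority-ordered nested loop with early return by a flat keyword-to-count map: collect counts of all matching keywords in one comprehension and return their max (default 8), relying on counts descending with priority.
import Mathlib
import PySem

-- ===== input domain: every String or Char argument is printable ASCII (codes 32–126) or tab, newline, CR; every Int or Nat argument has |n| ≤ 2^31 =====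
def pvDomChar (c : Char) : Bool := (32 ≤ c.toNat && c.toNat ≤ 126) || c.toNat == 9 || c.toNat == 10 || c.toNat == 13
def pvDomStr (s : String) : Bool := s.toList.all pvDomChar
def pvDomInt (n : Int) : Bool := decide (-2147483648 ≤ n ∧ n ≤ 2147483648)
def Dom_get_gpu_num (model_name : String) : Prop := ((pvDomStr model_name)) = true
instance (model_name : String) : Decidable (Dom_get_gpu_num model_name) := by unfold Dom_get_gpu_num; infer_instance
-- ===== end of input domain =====

-- B is a simpler decomposition: a flat keyword→count map scanned once, returning the max matched count (default 8).

-- ===== PORT A =====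
-- A-side helper: the literal kws dict of A
def pvKws : PySem.Dict Int (List String) :=
  ((((PySem.Dict.empty).insert 8 ["65b", "70b"]).insert 4 ["30b", "33b", "35b", "40b"]).insert
      2 ["13b", "14b", "20b"]).insert 1 ["6b", "7b"]

def get_gpu_num (model_name : String) : Int :=
  let m := PySem.Str.lower model_name
  let kws := pvKws
  -- the nested for-loops with early return, as a short-circuiting fold over an Option accumulator
  let res : Option Int :=
    [(8 : Int), 4, 2, 1].foldl
      (fun acc k =>
        (PySem.Dict.getD kws k []).foldl
          (fun acc keyword =>
            match acc with
            | some v => some v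
            | none => if PySem.Str.isIn keyword m then some k else none)
          acc)
      none
  res.getD 8

-- ===== PORT B =====
def get_gpu_num_alt (model_name : String) : Int :=
  let m := PySem.Str.lower model_name
  let counts : List (String × Int) :=
    [("65b", 8), ("70b", 8), ("30b", 4), ("33b", 4), ("35b", 4), ("40b", 4),
     ("13b", 2), ("14b", 2), ("20b", 2), ("6b", 1), ("7b", 1)]
  let matched := (counts.filter (fun p => PySem.Str.isIn p.1 m)).map (fun p => p.2)
  match PySem.List.max? matched (fun x => x) with
  | some v => v
  | none => 8

-- ===== PRECONDITION & SPEC =====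
def Spec_get_gpu_num (model_name : String) (out : Int) : Prop := out = get_gpu_num_alt model_name
instance (model_name : String) (out : Int) : Decidable (Spec_get_gpu_num model_name out) := by unfold Spec_get_gpu_num; infer_instance

-- ===== CLAIM (what is proved, stated in full; the proofs are below) =====
def Claim_equal_get_gpu_num : Prop := ∀ (model_name : String), Dom_get_gpu_num model_name → Spec_get_gpu_num model_name (get_gpu_num model_name)

-- ===== LEMMAS AND PROOFS =====

-- Both results are functions of the eleven substring tests on the same lowered name;
-- the equality is a finite Boolean fact, checked for all 2^11 valuations by `decide`.
-- proof helpers: both ports as functions of the eleven substring tests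
def pvStep (acc : Option Int) (b : Bool) (k : Int) : Option Int :=
  match acc with
  | some v => some v
  | none => if b then some k else none

def pvBcons (b : Bool) (x : String × Int) (rest : List (String × Int)) : List (String × Int) :=
  match b with
  | true => x :: rest
  | false => rest

def pvA (b1 b2 b3 b4 b5 b6 b7 b8 b9 b10 b11 : Bool) : Int :=
  ((pvStep (pvStep (pvStep (pvStep (pvStep (pvStep (pvStep (pvStep (pvStep (pvStep (pvStep none b1 8) b2 8) b3 4) b4 4) b5 4) b6 4) b7 2) b8 2) b9 2) b10 1) b11 1)).getD 8

def pvB (b1 b2 b3 b4 b5 b6 b7 b8 b9 b10 b11 : Bool) : Int :=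
  match PySem.List.max? (List.map (fun p => p.2) (pvBcons b1 ("65b", 8) (pvBcons b2 ("70b", 8) (pvBcons b3 ("30b", 4) (pvBcons b4 ("33b", 4) (pvBcons b5 ("35b", 4) (pvBcons b6 ("40b", 4) (pvBcons b7 ("13b", 2) (pvBcons b8 ("14b", 2) (pvBcons b9 ("20b", 2) (pvBcons b10 ("6b", 1) (pvBcons b11 ("7b", 1) [])))))))))))) (fun x => x) with
  | some v => v
  | none => 8

theorem pvKws_getD_8 : PySem.Dict.getD pvKws 8 [] = ["65b", "70b"] := rfl
theorem pvKws_getD_4 : PySem.Dict.getD pvKws 4 [] = ["30b", "33b", "35b", "40b"] := rfl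
theorem pvKws_getD_2 : PySem.Dict.getD pvKws 2 [] = ["13b", "14b", "20b"] := rfl
theorem pvKws_getD_1 : PySem.Dict.getD pvKws 1 [] = ["6b", "7b"] := rfl

theorem pvA_bridge (model_name : String) :
    get_gpu_num model_name = pvA (PySem.Str.isIn "65b" (PySem.Str.lower model_name)) (PySem.Str.isIn "70b" (PySem.Str.lower model_name)) (PySem.Str.isIn "30b" (PySem.Str.lower model_name)) (PySem.Str.isIn "33b" (PySem.Str.lower model_name)) (PySem.Str.isIn "35b" (PySem.Str.lower model_name)) (PySem.Str.isIn "40b" (PySem.Str.lower model_name)) (PySem.Str.isIn "13b" (PySem.Str.lower model_name)) (PySem.Str.isIn "14b" (PySem.Str.lower model_name)) (PySem.Str.isIn "20b" (PySem.Str.lower model_name)) (PySem.Str.isIn "6b" (PySem.Str.lower model_name)) (PySem.Str.isIn "7b" (PySem.Str.lower model_name)) := by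
  simp only [get_gpu_num, pvA, pvStep, pvKws_getD_8, pvKws_getD_4, pvKws_getD_2, pvKws_getD_1,
    List.foldl]

theorem pvB_bridge (model_name : String) :
    get_gpu_num_alt model_name = pvB (PySem.Str.isIn "65b" (PySem.Str.lower model_name)) (PySem.Str.isIn "70b" (PySem.Str.lower model_name)) (PySem.Str.isIn "30b" (PySem.Str.lower model_name)) (PySem.Str.isIn "33b" (PySem.Str.lower model_name)) (PySem.Str.isIn "35b" (PySem.Str.lower model_name)) (PySem.Str.isIn "40b" (PySem.Str.lower model_name)) (PySem.Str.isIn "13b" (PySem.Str.lower model_name)) (PySem.Str.isIn "14b" (PySem.Str.lower model_name)) (PySem.Str.isIn "20b" (PySem.Str.lower model_name)) (PySem.Str.isIn "6b" (PySem.Str.lower model_name)) (PySem.Str.isIn "7b" (PySem.Str.lower model_name)) := by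
  simp only [get_gpu_num_alt, pvB, pvBcons, List.filter]
  rfl

theorem pvAB : ∀ (b1 b2 b3 b4 b5 b6 b7 b8 b9 b10 b11 : Bool), pvA b1 b2 b3 b4 b5 b6 b7 b8 b9 b10 b11 = pvB b1 b2 b3 b4 b5 b6 b7 b8 b9 b10 b11 := by decide

theorem get_gpu_num_eq (model_name : String) :
    get_gpu_num model_name = get_gpu_num_alt model_name := by
  rw [pvA_bridge, pvB_bridge]; exact pvAB _ _ _ _ _ _ _ _ _ _ _

-- ===== VERDICT (by name: the statement is the Claim_ definition above) =====
theorem get_gpu_num_spec : Claim_equal_get_gpu_num := by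
  intro model_name _
  unfold Spec_get_gpu_num
  exact get_gpu_num_eq model_name
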